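/- GENERATED by farm/worked/mk_tree_copies.py from farm/worked/codebook_decode_scalar_raw.COMPOSITION/Proof.lean (a worked proof of the farm's unit `codebook_decode_scalar_raw.COMPOSITION`,
   accepted by the verdict) — do not edit. -/
import Vorbis.Spec.Units.codebook_decode_scalar_raw_COMPOSITION

/-
  THE COMPOSITION OF codebook_decode_scalar_raw: the four segment statements give the function's contract. Pure chaining: segment
  .1 (the refill of the accumulator) has three exits — the binary search (.2), the linear search (.3), the `return −1` of an
  empty accumulator (straight into .4) — and they ARE the entry assertions of segments .2, .3, .4; segments .2 and .3 end at the
  entry of .4 (the epilogue), which ends in the contract's `Returned`. No loop crosses a segment boundary.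
-/
namespace Vorbis.Spec.Worked.codebook_decode_scalar_raw_COMPOSITION
open Vorbis.Spec.codebook_decode_scalar_raw_COMPOSITION (Statement)
open X86 X86.User Asan Vorbis Vorbis.Spec

/-- **THE COMPOSITION**: the statement of the unit, by `ReachVia.trans` alone. -/
theorem codebook_decode_scalar_raw_composes_w : Statement := by
  intro Lay _ μ _ u₀ h1 h2 h3 h4 others frames Blk len e ret he hpre
  refine (h1 others frames Blk len ret e he hpre).trans ?_
  intro v hv
  rcases hv with hb | hl | hx
  · -- the binary search, then the epilogue
    refine (h2 others frames Blk len ret e v hb).trans ?_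
    intro w hw
    exact h4 others frames Blk len ret e w hw
  · -- the linear search, then the epilogue
    refine (h3 others frames Blk len ret e v hl).trans ?_
    intro w hw
    exact h4 others frames Blk len ret e w hw
  · -- straight to the epilogue
    exact h4 others frames Blk len ret e v hx

end Vorbis.Spec.Worked.codebook_decode_scalar_raw_COMPOSITION

theorem Vorbis.Spec.Worked.codebook_decode_scalar_raw_COMPOSITION_ok : Vorbis.Spec.codebook_decode_scalar_raw_COMPOSITION.Statement :=
  Vorbis.Spec.Worked.codebook_decode_scalar_raw_COMPOSITION.codebook_decode_scalar_raw_composes_w
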